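-- pv_equiv track=rewrite | github.com/giguan2/- | bot.py | _format_hashtags
-- ===== SOURCE A (Python) =====
-- def _format_hashtags(tags: list[str], per_line: int = 4) -> str:
--     tags = [t for t in (tags or []) if (t or "").strip()]
--     if not tags:
--         return ""
--     per_line = max(3, int(per_line or 4))
--     lines = []
--     for i in range(0, len(tags), per_line):
--         chunk = tags[i:i+per_line]
--         lines.append(" ".join([f"#{t.replace(' ', '')}" for t in chunk]))
--     return "\n".join(lines).strip()
-- ===== SOURCE B (Python) =====
-- def _format_hashtags(tags: list[str], per_line: int = 4) -> str:
--     filtered = [t for t in (tags or []) if (t or "").strip()]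
--     per_line = max(3, int(per_line or 4))
--     parts = []
--     for i, t in enumerate(filtered):
--         if i:
--             parts.append("\n" if i % per_line == 0 else " ")
--         parts.append("#" + t.replace(" ", ""))
--     return "".join(parts).strip()
-- ===== Notes on version B (the rewrite author's own statement) =====
-- stated objective: alternative
-- what changed: B replaces A's slice-into-chunks loop and join-of-joins by a single flat pass over the formatted tokens that picks each separator ('\n' at indices divisible by per_line, ' ' otherwise) by a running index modulo, joining once at the end.
import Mathlib
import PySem

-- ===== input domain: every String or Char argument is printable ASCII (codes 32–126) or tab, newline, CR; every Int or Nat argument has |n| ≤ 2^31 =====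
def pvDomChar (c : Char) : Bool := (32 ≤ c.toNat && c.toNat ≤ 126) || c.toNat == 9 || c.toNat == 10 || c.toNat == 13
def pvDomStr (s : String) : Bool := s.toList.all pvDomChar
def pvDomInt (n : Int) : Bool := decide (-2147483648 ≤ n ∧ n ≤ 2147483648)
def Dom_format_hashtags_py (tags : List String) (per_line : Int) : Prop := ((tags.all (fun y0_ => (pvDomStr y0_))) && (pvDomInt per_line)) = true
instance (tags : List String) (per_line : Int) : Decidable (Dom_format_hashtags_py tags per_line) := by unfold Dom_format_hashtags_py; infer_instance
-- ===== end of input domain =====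

-- B re-assembles the hashtag string in one flat pass with a modulo-chosen separator per token
-- instead of A's slice-into-chunks and join-of-joins; same output, different decomposition (objective: alternative).

-- B assembles the hashtag string in one flat pass with a modulo-chosen separator per token,
-- instead of A's slice-into-chunks and join-of-joins (objective: alternative decomposition).

-- ===== PORT A =====
def format_hashtags_py (tags : List String) (per_line : Int) : String :=
  let tags2 := tags.filter (fun t => decide (PySem.Str.strip t ≠ ""))
  if tags2 = [] then ""
  else
    let pl : Int := max 3 (if per_line = 0 then 4 else per_line)
    let lines := (PySem.List.pyRange 0 (PySem.List.len tags2) pl).foldl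
      (fun lines i =>
        let chunk := PySem.List.slice tags2 (some i) (some (i + pl))
        lines ++ [PySem.Str.join " " (chunk.map (fun t => "#" ++ PySem.Str.replace t " " ""))])
      []
    PySem.Str.strip (PySem.Str.join "\n" lines)

-- ===== PORT B =====
def format_hashtags_py_alt (tags : List String) (per_line : Int) : String :=
  let filtered := tags.filter (fun t => decide (PySem.Str.strip t ≠ ""))
  let pl : Int := max 3 (if per_line = 0 then 4 else per_line)
  let parts := (PySem.List.enumerate filtered).foldl
    (fun parts it =>
      let parts := if it.1 ≠ 0 then
          parts ++ [if PySem.Int.mod it.1 pl = 0 then "\n" else " "]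
        else parts
      parts ++ ["#" ++ PySem.Str.replace it.2 " " ""])
    []
  PySem.Str.strip (PySem.Str.join "" parts)

-- ===== PRECONDITION & SPEC =====
def Spec_format_hashtags_py (tags : List String) (per_line : Int) (out : String) : Prop := out = format_hashtags_py_alt tags per_line
instance (tags : List String) (per_line : Int) (out : String) : Decidable (Spec_format_hashtags_py tags per_line out) := by unfold Spec_format_hashtags_py; infer_instance

-- ===== CLAIM (what is proved, stated in full; the proofs are below) =====
def Claim_equal_format_hashtags_py : Prop := ∀ (tags : List String) (per_line : Int), Dom_format_hashtags_py tags per_line → Spec_format_hashtags_py tags per_line (format_hashtags_py tags per_line)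

-- ===== LEMMAS AND PROOFS =====

def tokC (t : String) : List Char := '#' :: PySem.Chars.replace t.toList [' '] []
def chunksF {α : Type} (p : Nat) : List α → List (List α)
  | [] => []
  | x :: xs => (x :: xs.take (p-1)) :: chunksF p (xs.drop (p-1))
termination_by l => l.length
decreasing_by simp
def bgo (p : Int) (i : Int) : List (List Char) → List Char
  | [] => []
  | t :: rest =>
      (if i ≠ 0 then (if PySem.Int.mod i p = 0 then ['\n'] else [' ']) else []) ++ t ++ bgo p (i+1) rest
theorem fmod_zero_iff (i p : Int) (hp : 0 < p) : PySem.Int.mod i p = 0 ↔ p ∣ i := by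
  have h : Int.fmod i p = i % p + if 0 ≤ p ∨ p ∣ i then 0 else p := Int.fmod_eq_emod
  simp [PySem.Int.mod, h, hp.le]
theorem ic_cons (sep a : List Char) (L : List (List Char)) :
    List.intercalate sep (a :: L) = a ++ L.flatMap (fun x => sep ++ x) := by
  induction L generalizing a
  · simp [List.intercalate, List.intersperse]
  · simp_all [List.intercalate, List.intersperse]

theorem ic_nil_flatten (L : List (List Char)) : List.intercalate [] L = L.flatten := by
  cases L with
  | nil => simp [List.intercalate]
  | cons a L => simp [ic_cons]

theorem chunksF_step {α : Type} (p : Nat) (hp : 1 ≤ p) (fs : List α) (h : fs ≠ []) :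
    chunksF p fs = fs.take p :: chunksF p (fs.drop p) := by
  match fs with
  | x :: xs =>
    rw [chunksF]
    match p, hp with
    | (q+1), _ => simp

theorem chunksF_map {α β : Type} (p : Nat) (f : α → β) : ∀ (l : List α),
    chunksF p (l.map f) = (chunksF p l).map (List.map f) := by
  intro l
  induction l using chunksF.induct p with
  | case1 => simp [chunksF]
  | case2 x xs ih => rw [List.map_cons, chunksF, chunksF, List.map_cons]
                     simp [← List.map_take, ← List.map_drop, ih]

theorem S_run (p : Int) (hp : 0 < p) :
    ∀ (c : List (List Char)) (i : Int), 0 < i →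
      (∀ k : Nat, k < c.length → ¬ (p ∣ (i + k))) → ∀ rest,
      bgo p i (c ++ rest) = c.flatMap (fun t => ' ' :: t) ++ bgo p (i + c.length) rest := by
  intro c
  induction c with
  | nil => intro i _ _ rest; simp
  | cons t c ih =>
    intro i hi h rest
    rw [List.cons_append, bgo]
    have h0 : ¬ (p ∣ i) := by have := h 0 (by simp); simpa using this
    rw [if_pos (by omega), if_neg (by rw [fmod_zero_iff _ _ hp]; exact h0)]
    rw [ih (i+1) (by omega) (fun k hk => by
      have h' := h (k+1) (by simp; omega)
      push_cast at h'
      rwa [show i + 1 + (k:ℤ) = i + ((k:ℤ)+1) by ring]) rest]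
    simp
    congr 1
    ring

theorem CS (p : Int) (hp : 0 < p) (ts : List (List Char)) (h : ts ≠ []) (i : Int)
    (hi : 0 ≤ i) (hd : p ∣ i) :
    bgo p i ts = (if i = 0 then [] else ['\n']) ++ List.intercalate [' '] (ts.take p.toNat)
      ++ bgo p (i + (ts.take p.toNat).length) (ts.drop p.toNat) := by
  match ts with
  | t :: ts' =>
    have hp1 : 1 ≤ p.toNat := by omega
    rw [bgo]
    have htake : (t :: ts').take p.toNat = t :: ts'.take (p.toNat - 1) := by
      match p.toNat, hp1 with
      | (q+1), _ => simp
    have hdrop : (t :: ts').drop p.toNat = ts'.drop (p.toNat - 1) := by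
      match p.toNat, hp1 with
      | (q+1), _ => simp
    rw [htake, hdrop, ic_cons]
    have hsep : (if i ≠ 0 then (if PySem.Int.mod i p = 0 then ['\n'] else [' ']) else []) = (if i = 0 then ([]:List Char) else ['\n']) := by
      by_cases h0 : i = 0
      · simp [h0]
      · rw [if_pos h0, if_neg h0, if_pos ((fmod_zero_iff _ _ hp).mpr hd)]
    rw [hsep]
    have hsplit : ts' = ts'.take (p.toNat - 1) ++ ts'.drop (p.toNat - 1) := (List.take_append_drop _ _).symm
    rw [show bgo p (i+1) ts' = bgo p (i+1) (ts'.take (p.toNat - 1) ++ ts'.drop (p.toNat - 1)) by rw [← hsplit]]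
    rw [S_run p hp _ (i+1) (by omega) ?_ _]
    · simp [List.append_assoc]
      congr 1
      ring
    · intro k hk
      have hklt : k < p.toNat - 1 := lt_of_lt_of_le hk (by simp)
      rintro ⟨m, hm⟩
      obtain ⟨m', hm'⟩ := hd
      have hdvd2 : ((k:ℤ)+1) = p * (m - m') := by rw [mul_sub]; omega
      have : p ≤ (k:ℤ)+1 := Int.le_of_dvd (by omega) ⟨m - m', hdvd2⟩
      omega

theorem M0 (p : Int) (hp : 0 < p) :
    ∀ (n : Nat) (ts : List (List Char)), ts.length ≤ n → ∀ i : Int, 0 < i → p ∣ i →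
    bgo p i ts = (chunksF p.toNat ts).flatMap (fun c => '\n' :: List.intercalate [' '] c) := by
  intro n
  induction n with
  | zero =>
    intro ts hts i _ _
    have h0 : ts = [] := List.length_eq_zero_iff.mp (by omega)
    subst h0; simp [bgo, chunksF]
  | succ n ih =>
    intro ts hts i hi hd
    by_cases hts0 : ts = []
    · subst hts0; simp [bgo, chunksF]
    · rw [CS p hp ts hts0 i (by omega) hd, if_neg (by omega)]
      rw [chunksF_step p.toNat (by omega) ts hts0]
      rw [List.flatMap_cons]
      by_cases hrest : ts.drop p.toNat = []
      · rw [hrest]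
        simp [bgo, chunksF]
      · have hlen : p.toNat ≤ ts.length := by
          by_contra hc
          exact hrest (List.drop_eq_nil_of_le (by omega))
        have htl : (ts.take p.toNat).length = p.toNat := by simp [hlen]
        rw [htl, ih (ts.drop p.toNat) (by simp; omega) (i + p.toNat) (by omega)
            ⟨(i / p) + 1, by obtain ⟨m, hm⟩ := hd; rw [hm]; rw [mul_add]; simp [Int.mul_ediv_cancel_left _ (by omega : p ≠ 0)]; omega⟩]
        simp

theorem MAIN (p : Int) (hp : 0 < p) (ts : List (List Char)) (h : ts ≠ []) :
    bgo p 0 ts = List.intercalate ['\n'] ((chunksF p.toNat ts).map (List.intercalate [' '])) := by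
  rw [CS p hp ts h 0 le_rfl ⟨0, by ring⟩, if_pos rfl]
  rw [chunksF_step p.toNat (by omega) ts h, List.map_cons, ic_cons]
  by_cases hrest : ts.drop p.toNat = []
  · rw [hrest]; simp [bgo, chunksF]
  · have hlen : p.toNat ≤ ts.length := by
      by_contra hc
      exact hrest (List.drop_eq_nil_of_le (by omega))
    have htl : (ts.take p.toNat).length = p.toNat := by simp [hlen]
    rw [htl, M0 p hp (ts.drop p.toNat).length _ le_rfl (0 + p.toNat) (by omega) ⟨1, by omega⟩]
    simp [List.flatMap_map]
theorem pyRange_pos_nil (a b s : Int) (hs : 0 < s) (h : b ≤ a) : PySem.List.pyRange a b s = [] := by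
  rw [PySem.List.pyRange_of_pos a b hs]
  simp [show ¬ a < b by omega]

theorem pyRange_pos_cons (a b s : Int) (hs : 0 < s) (h : a < b) :
    PySem.List.pyRange a b s = a :: PySem.List.pyRange (a+s) b s := by
  rw [PySem.List.pyRange_of_pos a b hs, PySem.List.pyRange_of_pos (a+s) b hs]
  have hq : (b - a + s - 1) / s = (b - a - 1) / s + 1 := by
    have : b - a + s - 1 = (b - a - 1) + 1 * s := by ring
    rw [this, Int.add_mul_ediv_right _ _ (by omega : s ≠ 0)]
  have hq0 : 0 ≤ (b - a - 1) / s := Int.ediv_nonneg (by omega) hs.le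
  have h2 : (if a + s < b then ((b - (a+s) + s - 1) / s).toNat else 0) = ((b - a - 1)/s).toNat := by
    split
    · congr 1; congr 1; ring
    · have : 0 ≤ b - a - 1 := by omega
      have : (b - a - 1) / s = 0 := Int.ediv_eq_zero_of_lt (by omega) (by omega)
      omega
  rw [if_pos h, hq, h2]
  have : ((b - a - 1) / s + 1).toNat = ((b-a-1)/s).toNat + 1 := by omega
  rw [this, List.range_succ_eq_map]
  simp only [List.map_cons, List.map_map, Function.comp_def]
  congr 1
  · ring
  · apply List.map_congr_left; intro k _; push_cast; ring

theorem pyRange_pos_shift (b s : Int) (hs : 0 < s) :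
    PySem.List.pyRange s b s = (PySem.List.pyRange 0 (b - s) s).map (· + s) := by
  rw [PySem.List.pyRange_of_pos _ b hs, PySem.List.pyRange_of_pos _ (b-s) hs]
  rw [List.map_map]
  have hc : (if s < b then ((b - s + s - 1) / s).toNat else 0) = (if 0 < b - s then ((b - s - 0 + s - 1) / s).toNat else 0) := by
    by_cases hb : s < b
    · rw [if_pos hb, if_pos (by omega)]; norm_num
    · rw [if_neg hb, if_neg (by omega)]
  rw [hc]
  apply List.map_congr_left; intro k _; simp [Function.comp]; ring

theorem A_map (p : Int) (hp : 0 < p) {β : Type} (f : List String → β) :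
    ∀ (n : Nat) (fs : List String), fs.length ≤ n →
    (PySem.List.pyRange 0 (fs.length : Int) p).map
        (fun i => f (PySem.List.slice fs (some i) (some (i + p)))) =
      (chunksF p.toNat fs).map f := by
  intro n
  induction n with
  | zero =>
    intro fs hfs
    have h0 : fs = [] := List.length_eq_zero_iff.mp (by omega)
    subst h0; simp [chunksF, pyRange_pos_nil 0 0 p hp le_rfl]
  | succ n ih =>
    intro fs hfs
    by_cases h0 : fs = []
    · subst h0; simp [chunksF, pyRange_pos_nil 0 0 p hp le_rfl]
    · have hlen : 0 < fs.length := List.length_pos_iff.mpr h0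
      rw [pyRange_pos_cons 0 (fs.length : Int) p hp (by exact_mod_cast hlen), List.map_cons]
      rw [chunksF_step p.toNat (by omega) fs h0, List.map_cons]
      have hhead : PySem.List.slice fs (some 0) (some (0 + p)) = fs.take p.toNat := by
        rw [PySem.List.slice_toNat fs le_rfl (by omega)]
        simp
      rw [hhead, zero_add]
      congr 1
      by_cases hple : p ≤ (fs.length : Int)
      · have hrlen : ((fs.drop p.toNat).length : Int) = (fs.length : Int) - p := by
          simp; omega
        rw [pyRange_pos_shift (fs.length : Int) p hp, List.map_map, ← hrlen]
        rw [← ih (fs.drop p.toNat) (by simp; omega)]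
        apply List.map_congr_left
        intro j hj
        have hj0 : 0 ≤ j := ((PySem.List.mem_pyRange_iff_of_pos hp j).mp hj).1
        simp only [Function.comp]
        congr 1
        rw [PySem.List.slice_toNat fs (by omega) (by omega),
            PySem.List.slice_toNat (fs.drop p.toNat) (by omega) (by omega)]
        rw [List.drop_drop]
        congr 1
        · omega
        · congr 1; omega
      · have hrest : fs.drop p.toNat = [] := List.drop_eq_nil_of_le (by omega)
        rw [hrest]
        rw [pyRange_pos_nil p (fs.length:Int) p hp (by omega)]
        simp [chunksF]

theorem B_parts (pl : Int) : ∀ (fs : List String) (i : Int) (acc : List String),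
    (PySem.List.enumerate fs i).foldl
      (fun parts it =>
        (if it.1 ≠ 0 then parts ++ [if PySem.Int.mod it.1 pl = 0 then "\n" else " "] else parts)
          ++ ["#" ++ PySem.Str.replace it.2 " " ""]) acc
    = acc ++ (PySem.List.enumerate fs i).flatMap
        (fun it => (if it.1 ≠ 0 then [if PySem.Int.mod it.1 pl = 0 then ("\n":String) else " "] else [])
          ++ ["#" ++ PySem.Str.replace it.2 " " ""]) := by
  intro fs
  induction fs with
  | nil => intro i acc; simp [PySem.List.enumerate]
  | cons t fs ih =>
    intro i acc
    simp only [PySem.List.enumerate, List.foldl_cons, List.flatMap_cons]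
    rw [ih]
    by_cases h0 : i ≠ 0 <;> simp [h0]

theorem B_flat (pl : Int) : ∀ (fs : List String) (i : Int),
    (((PySem.List.enumerate fs i).flatMap
        (fun it => (if it.1 ≠ 0 then [if PySem.Int.mod it.1 pl = 0 then ("\n":String) else " "] else [])
          ++ ["#" ++ PySem.Str.replace it.2 " " ""])).map String.toList).flatten
      = bgo pl i (fs.map tokC) := by
  intro fs
  induction fs with
  | nil => intro i; simp [PySem.List.enumerate, bgo]
  | cons t fs ih =>
    intro i
    simp only [PySem.List.enumerate, List.flatMap_cons, List.map_cons, List.map_append,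
      List.flatten_append, bgo, ih]
    by_cases h0 : i ≠ 0
    · simp only [if_pos h0]
      by_cases hm : PySem.Int.mod i pl = 0 <;>
        simp [hm, tokC, PySem.Str.toList_replace, String.toList_append]
    · simp [h0, tokC, PySem.Str.toList_replace, String.toList_append]

theorem flatMap_sing {α β : Type} (f : α → β) (l : List α) :
    l.flatMap (fun x => [f x]) = l.map f := by
  induction l with
  | nil => rfl
  | cons a l ih => simp [ih]

theorem format_hashtags_py_spec' : ∀ (tags : List String) (per_line : Int),
    format_hashtags_py tags per_line = format_hashtags_py_alt tags per_line := by
  intro tags per_line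
  unfold format_hashtags_py format_hashtags_py_alt
  dsimp only
  set F := tags.filter (fun t => decide (PySem.Str.strip t ≠ "")) with hF
  by_cases hFe : F = []
  · rw [if_pos hFe, hFe]
    simp [PySem.List.enumerate]
    decide
  · rw [if_neg hFe]
    set pl : Int := max 3 (if per_line = 0 then 4 else per_line) with hpl
    have hplpos : 0 < pl := lt_of_lt_of_le (by norm_num) (le_max_left _ _)
    -- A side: foldl → map
    rw [PySem.List.foldl_append_eq_flatMap
      (fun i => [PySem.Str.join " " ((PySem.List.slice F (some i) (some (i + pl))).map
        (fun t => "#" ++ PySem.Str.replace t " " ""))])]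
    rw [B_parts pl F 0 []]
    simp only [List.nil_append]
    -- reduce to char lists
    simp only [PySem.Str.strip, PySem.Str.toList_join, PySem.Chars.join]
    congr 1
    have hnl : ("\n":String).toList = ['\n'] := by decide
    have hsp : (" ":String).toList = [' '] := by decide
    have hemp : ("":String).toList = [] := by decide
    rw [hnl, hemp]
    apply congrArg
    -- B side to bgo
    rw [show List.intercalate ([]:List Char) = List.flatten from funext ic_nil_flatten]
    rw [B_flat pl F 0]
    -- A side: singleton flatMap → map, then strings → char lists, then chunks
    rw [flatMap_sing]
    rw [List.map_map]
    have hline : ∀ c : List String,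
        (PySem.Str.join " " (c.map (fun t => "#" ++ PySem.Str.replace t " " ""))).toList
          = List.intercalate [' '] (c.map tokC) := by
      intro c
      rw [PySem.Str.toList_join, hsp]
      show List.intercalate [' '] _ = _
      congr 1
      rw [List.map_map]
      apply List.map_congr_left; intro t _
      simp [tokC, String.toList_append, PySem.Str.toList_replace]
    have hAmap := A_map pl hplpos
      (fun c => List.intercalate [' '] (c.map tokC)) F.length F le_rfl
    have hlen : PySem.List.len F = (F.length : Int) := by simp [PySem.List.len]
    rw [hlen]
    rw [show ((fun x => x.toList) ∘ fun i =>
        PySem.Str.join " " ((PySem.List.slice F (some i) (some (i + pl))).map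
          (fun t => "#" ++ PySem.Str.replace t " " "")))
      = (fun i => List.intercalate [' ']
          ((PySem.List.slice F (some i) (some (i + pl))).map tokC)) from
      funext (fun i => hline _)]
    rw [hAmap]
    rw [MAIN pl hplpos (F.map tokC) (by simpa using hFe)]
    rw [chunksF_map, List.map_map]
    rfl

-- ===== VERDICT (by name: the statement is the Claim_ definition above) =====
theorem format_hashtags_py_spec : Claim_equal_format_hashtags_py := by
  intro tags per_line _
  exact format_hashtags_py_spec' tags per_line
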